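-- pv_equiv track=rewrite | github.com/nikolareljin/git-lantern | src/lantern/cli.py | _resolve_selected_records
-- ===== SOURCE A (Python) =====
-- from typing import Any, Dict, List, MutableMapping, Optional, Set, Tuple
--
-- def _resolve_selected_records(records: List[Dict[str, str]], repos_csv: str) -> Tuple[List[Dict[str, str]], Optional[str]]:
--     names_or_paths = [x.strip() for x in (repos_csv or "").split(",") if x.strip()]
--     if not names_or_paths:
--         return records, None
--     by_name: Dict[str, List[Dict[str, str]]] = {}
--     by_path: Dict[str, Dict[str, str]] = {}
--     for rec in records:
--         name = str(rec.get("name") or "")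
--         by_name.setdefault(name, []).append(rec)
--         p = str(rec.get("path") or "")
--         by_path[p] = rec
--
--     selected: List[Dict[str, str]] = []
--     for key in names_or_paths:
--         if key in by_path:
--             selected.append(by_path[key])
--             continue
--         matches = by_name.get(key, [])
--         if len(matches) == 1:
--             selected.append(matches[0])
--             continue
--         if not matches:
--             return [], f"Repository not found: {key}"
--         return [], f"Repository name is ambiguous: {key}. Use full path."
--     return selected, None
-- ===== SOURCE B (Python) =====
-- from typing import Dict, List, Optional, Tuple
--
-- def _resolve_selected_records(records: List[Dict[str, str]], repos_csv: str) -> Tuple[List[Dict[str, str]], Optional[str]]: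
--     keys = [x.strip() for x in (repos_csv or "").split(",") if x.strip()]
--     if not keys:
--         return records, None
--     selected: List[Dict[str, str]] = []
--     for key in keys:
--         path_hit = None
--         for rec in records:
--             if str(rec.get("path") or "") == key:
--                 path_hit = rec
--         if path_hit is not None:
--             selected.append(path_hit)
--             continue
--         matches = [rec for rec in records if str(rec.get("name") or "") == key]
--         if not matches:
--             return [], f"Repository not found: {key}"
--         if len(matches) > 1:
--             return [], f"Repository name is ambiguous: {key}. Use full path."
--         selected.append(matches[0])
--     return selected, None
-- ===== Notes on version B (the rewrite author's own statement) =====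
-- stated objective: simpler
-- what changed: Dropped the by_name/by_path dict pre-indexing: each key is resolved by a direct scan of the records (last path match wins; name matches collected in record order), preserving path-over-name precedence and the exact error strings.
import Mathlib
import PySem

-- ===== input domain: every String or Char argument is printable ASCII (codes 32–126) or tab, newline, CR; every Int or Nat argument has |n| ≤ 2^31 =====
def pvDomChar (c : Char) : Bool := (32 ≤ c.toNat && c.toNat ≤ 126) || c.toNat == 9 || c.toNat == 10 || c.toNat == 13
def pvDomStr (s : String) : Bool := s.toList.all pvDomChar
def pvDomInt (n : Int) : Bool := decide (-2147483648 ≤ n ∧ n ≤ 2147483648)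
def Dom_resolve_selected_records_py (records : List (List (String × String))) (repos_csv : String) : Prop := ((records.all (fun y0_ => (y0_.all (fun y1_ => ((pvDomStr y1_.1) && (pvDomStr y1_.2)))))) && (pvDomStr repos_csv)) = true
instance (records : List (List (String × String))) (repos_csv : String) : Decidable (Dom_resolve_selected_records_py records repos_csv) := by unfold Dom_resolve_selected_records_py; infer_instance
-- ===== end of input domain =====

-- B drops A's by_name/by_path pre-indexing and resolves each key by a direct scan of the
-- records (objective: simpler); return values proved equal on every input.

-- str(rec.get(k) or "") for a string-valued dict rec (None and "" both give "")
def pvGetS (rec : List (String × String)) (k : String) : String :=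
  ((PySem.Dict.mk rec).get? k).getD ""

-- ===== PORT A =====
def pvALoop (by_name : PySem.Dict String (List (List (String × String))))
    (by_path : PySem.Dict String (List (String × String))) :
    List String → List (List (String × String)) → (List (List (String × String))) × Option String
  | [], selected => (selected, none)
  | key :: rest, selected =>
    if by_path.contains key then
      pvALoop by_name by_path rest (selected ++ [(by_path.get? key).getD []])
    else
      let ms_ := by_name.getD key []
      if ms_.length = 1 then
        pvALoop by_name by_path rest (selected ++ [PySem.List.pyGetD ms_ 0 []])
      else if ms_ = [] then
        ([], some ("Repository not found: " ++ key))
      else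
        ([], some ("Repository name is ambiguous: " ++ key ++ ". Use full path."))

def resolve_selected_records_py (records : List (List (String × String))) (repos_csv : String) : (List (List (String × String))) × Option String :=
  let names_or_paths := (((PySem.Str.split? repos_csv ",").getD []).map PySem.Str.strip).filter (fun x => x ≠ "")
  if names_or_paths = [] then (records, none)
  else
    let by_name := records.foldl (fun d rec => d.modify (pvGetS rec "name") [] (· ++ [rec])) PySem.Dict.empty
    let by_path := records.foldl (fun d rec => d.insert (pvGetS rec "path") rec) PySem.Dict.empty
    pvALoop by_name by_path names_or_paths []

-- ===== PORT B =====
def pvBLoop (records : List (List (String × String))) :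
    List String → List (List (String × String)) → (List (List (String × String))) × Option String
  | [], selected => (selected, none)
  | key :: rest, selected =>
    let path_hit := records.foldl (fun acc rec => if pvGetS rec "path" == key then some rec else acc) none
    match path_hit with
    | some rec => pvBLoop records rest (selected ++ [rec])
    | none =>
      let ms_ := records.filter (fun rec => pvGetS rec "name" == key)
      match ms_ with
      | [] => ([], some ("Repository not found: " ++ key))
      | [m] => pvBLoop records rest (selected ++ [m])
      | _ => ([], some ("Repository name is ambiguous: " ++ key ++ ". Use full path."))

def resolve_selected_records_py_alt (records : List (List (String × String))) (repos_csv : String) : (List (List (String × String))) × Option String :=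
  let keys := (((PySem.Str.split? repos_csv ",").getD []).map PySem.Str.strip).filter (fun x => x ≠ "")
  if keys = [] then (records, none)
  else pvBLoop records keys []

-- ===== PRECONDITION & SPEC =====
def Spec_resolve_selected_records_py (records : List (List (String × String))) (repos_csv : String) (out : (List (List (String × String))) × Option String) : Prop := out = resolve_selected_records_py_alt records repos_csv
instance (records : List (List (String × String))) (repos_csv : String) (out : (List (List (String × String))) × Option String) : Decidable (Spec_resolve_selected_records_py records repos_csv out) := by unfold Spec_resolve_selected_records_py; infer_instance

-- ===== CLAIM (what is proved, stated in full; the proofs are below) =====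
def Claim_equal_resolve_selected_records_py : Prop := ∀ (records : List (List (String × String))) (repos_csv : String), Dom_resolve_selected_records_py records repos_csv → Spec_resolve_selected_records_py records repos_csv (resolve_selected_records_py records repos_csv)

-- ===== LEMMAS AND PROOFS =====

-- A's by_path lookup = B's last-match scan
theorem pv_by_path_get (records : List (List (String × String))) (key : String)
    (d : PySem.Dict String (List (String × String))) :
    (records.foldl (fun d rec => d.insert (pvGetS rec "path") rec) d).get? key
      = records.foldl (fun acc rec => if pvGetS rec "path" == key then some rec else acc) (d.get? key) := by
  induction records generalizing d with
  | nil => rfl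
  | cons rec rest ih =>
    simp only [List.foldl_cons, ih]
    congr 1
    rw [PySem.Dict.get?_insert]
    by_cases h : pvGetS rec "path" == key
    · simp [eq_of_beq h]
    · have h' : key ≠ pvGetS rec "path" := fun e => h (by simp [e])
      simp [h, h']

-- A's by_name lookup = B's filter
theorem pv_by_name_getD (records : List (List (String × String))) (key : String) :
    (records.foldl (fun d rec => d.modify (pvGetS rec "name") [] (· ++ [rec])) PySem.Dict.empty).getD key []
      = records.filter (fun rec => pvGetS rec "name" == key) := by
  have hmap : records.foldl (fun d rec => d.modify (pvGetS rec "name") [] (· ++ [rec])) PySem.Dict.empty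
      = (records.map (fun r => (pvGetS r "name", r))).foldl
          (fun d p => d.modify p.1 [] (· ++ [p.2])) PySem.Dict.empty := by
    rw [List.foldl_map]
  rw [hmap, PySem.Dict.getD_foldl_modify_append]
  simp [List.filter_map, Function.comp_def, List.map_map]

theorem pv_loop_eq (records : List (List (String × String))) (keys : List String)
    (selected : List (List (String × String))) :
    pvALoop (records.foldl (fun d rec => d.modify (pvGetS rec "name") [] (· ++ [rec])) PySem.Dict.empty)
            (records.foldl (fun d rec => d.insert (pvGetS rec "path") rec) PySem.Dict.empty)
            keys selected
      = pvBLoop records keys selected := by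
  induction keys generalizing selected with
  | nil => rfl
  | cons key rest ih =>
    have hpath := pv_by_path_get records key PySem.Dict.empty
    rw [PySem.Dict.get?_empty] at hpath
    have hname := pv_by_name_getD records key
    simp only [pvALoop, pvBLoop, PySem.Dict.contains_eq_isSome_get?, hpath, hname]
    cases hscan : records.foldl (fun acc rec => if pvGetS rec "path" == key then some rec else acc)
        (none : Option (List (String × String))) with
    | some rec => simp [ih]
    | none =>
      simp only [Option.isSome_none, Bool.false_eq_true, if_false]
      cases hm : records.filter (fun rec => pvGetS rec "name" == key) with
      | nil => simp
      | cons m ms =>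
        cases ms with
        | nil => simp [PySem.List.pyGetD_zero_cons, ih]
        | cons m2 ms2 => simp

-- ===== VERDICT (by name: the statement is the Claim_ definition above) =====
theorem resolve_selected_records_py_spec : Claim_equal_resolve_selected_records_py := by
  intro records repos_csv _
  show resolve_selected_records_py records repos_csv = resolve_selected_records_py_alt records repos_csv
  simp only [resolve_selected_records_py, resolve_selected_records_py_alt]
  split_ifs with h
  · rfl
  · exact pv_loop_eq records _ []
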